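-- pv_equiv track=rewrite | github.com/gzwongkk/va-framework | apps/api/app/query_engine.py | _build_neighborhood
-- ===== SOURCE A (Python) =====
-- from collections import defaultdict
-- from typing import Any
--
-- def _build_neighborhood(
--     focus_node_id: str,
--     neighbor_depth: int,
--     filtered_edges: list[dict[str, Any]],
-- ) -> set[str]:
--     adjacency: dict[str, set[str]] = defaultdict(set)
--     for edge in filtered_edges:
--         adjacency[edge['source']].add(edge['target'])
--         adjacency[edge['target']].add(edge['source'])
--
--     visited = {focus_node_id}
--     frontier = {focus_node_id}
--
--     for _ in range(neighbor_depth):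
--         next_frontier: set[str] = set()
--         for node_id in frontier:
--             for neighbor_id in adjacency.get(node_id, set()):
--                 if neighbor_id not in visited:
--                     visited.add(neighbor_id)
--                     next_frontier.add(neighbor_id)
--         frontier = next_frontier
--
--     return visited
-- ===== SOURCE B (Python) =====
-- from collections import defaultdict, deque
-- from typing import Any
--
--
-- def _build_neighborhood(
--     focus_node_id: str,
--     neighbor_depth: int,
--     filtered_edges: list[dict[str, Any]],
-- ) -> set[str]:
--     adjacency: dict[str, set[str]] = defaultdict(set)
--     for edge in filtered_edges:
--         adjacency[edge['source']].add(edge['target'])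
--         adjacency[edge['target']].add(edge['source'])
--
--     visited = {focus_node_id}
--     queue = deque([(focus_node_id, 0)])
--     while queue:
--         node_id, depth = queue.popleft()
--         if depth < neighbor_depth:
--             for neighbor_id in adjacency.get(node_id, ()):
--                 if neighbor_id not in visited:
--                     visited.add(neighbor_id)
--                     queue.append((neighbor_id, depth + 1))
--     return visited
-- ===== Notes on version B (the rewrite author's own statement) =====
-- stated objective: alternative
-- what changed: Replaces the level-synchronous frontier-set expansion (neighbor_depth rounds, each rebuilding a next_frontier set) with a single FIFO-queue BFS that tracks each node's depth and expands a node only while its depth is below neighbor_depth.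
import Mathlib
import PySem

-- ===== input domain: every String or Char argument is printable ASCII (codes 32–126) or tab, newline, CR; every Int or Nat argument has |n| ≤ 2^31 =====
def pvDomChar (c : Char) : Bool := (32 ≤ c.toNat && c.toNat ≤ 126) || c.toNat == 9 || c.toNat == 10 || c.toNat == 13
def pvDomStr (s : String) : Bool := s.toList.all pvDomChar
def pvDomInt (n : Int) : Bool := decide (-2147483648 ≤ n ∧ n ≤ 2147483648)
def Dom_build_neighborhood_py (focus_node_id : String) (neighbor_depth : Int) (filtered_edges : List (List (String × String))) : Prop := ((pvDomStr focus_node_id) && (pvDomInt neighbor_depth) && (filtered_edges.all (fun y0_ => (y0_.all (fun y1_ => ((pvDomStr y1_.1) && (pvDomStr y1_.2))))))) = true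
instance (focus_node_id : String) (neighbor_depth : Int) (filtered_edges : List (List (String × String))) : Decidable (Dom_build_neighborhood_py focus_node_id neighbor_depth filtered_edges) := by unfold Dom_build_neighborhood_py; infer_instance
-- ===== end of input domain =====

-- B replaces A's level-synchronous frontier-set expansion by a single FIFO-queue BFS with
-- per-node depth tracking (objective: alternative decomposition, same asymptotic cost).
-- Both programs return a set; the ports return its elements in insertion order.

-- ===== PORT A =====
-- edge[k] on the association list: first match; total form returning "" when the key is
-- absent — Python raises KeyError there, excluded by Pre_build_neighborhood_py.
def pvEdgeGet (edge : List (String × String)) (k : String) : String :=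
  (((edge.find? (fun p => p.1 == k)).map Prod.snd).getD "")

-- adjacency: dict[str, set[str]] built with defaultdict(set); identical lines in A and B.
def pvBuildAdj (filtered_edges : List (List (String × String))) : PySem.Dict String (PySem.Set String) :=
  filtered_edges.foldl (fun d e =>
    (d.modify (pvEdgeGet e "source") [] (fun s => PySem.Set.add s (pvEdgeGet e "target"))).modify
      (pvEdgeGet e "target") [] (fun s => PySem.Set.add s (pvEdgeGet e "source"))) PySem.Dict.empty

def build_neighborhood_py (focus_node_id : String) (neighbor_depth : Int) (filtered_edges : List (List (String × String))) : List String :=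
  let adjacency := pvBuildAdj filtered_edges
  -- visited = {focus}; frontier = {focus}; for _ in range(neighbor_depth): expand one level
  ((PySem.List.pyRange 0 neighbor_depth 1).foldl (fun st _ =>
      st.2.foldl (fun st2 node_id =>
        (adjacency.getD node_id []).foldl (fun st3 neighbor_id =>
          if PySem.Set.contains st3.1 neighbor_id then st3
          else (PySem.Set.add st3.1 neighbor_id, PySem.Set.add st3.2 neighbor_id)) st2)
        (st.1, PySem.Set.empty))
    (PySem.Set.ofList [focus_node_id], PySem.Set.ofList [focus_node_id])).1

-- ===== PORT B =====
-- while queue: pop (node, depth); if depth < k expand, appending unvisited neighbors.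
-- The fuel argument only makes the recursion structural; with the fuel supplied below the
-- 0-case is never reached (each pop is an earlier enqueue, bounded by 1 + distinct nodes).
def pvBFS (adjacency : PySem.Dict String (PySem.Set String)) (k : Int) :
    Nat → List (String × Int) → PySem.Set String → PySem.Set String
  | 0, _, visited => visited
  | _ + 1, [], visited => visited
  | fuel + 1, (node_id, depth) :: rest, visited =>
      if depth < k then
        let st := (adjacency.getD node_id []).foldl (fun st neighbor_id =>
          if PySem.Set.contains st.1 neighbor_id then st
          else (PySem.Set.add st.1 neighbor_id, st.2 ++ [(neighbor_id, depth + 1)])) (visited, rest)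
        pvBFS adjacency k fuel st.2 st.1
      else pvBFS adjacency k fuel rest visited

def build_neighborhood_py_alt (focus_node_id : String) (neighbor_depth : Int) (filtered_edges : List (List (String × String))) : List String :=
  let adjacency := pvBuildAdj filtered_edges
  pvBFS adjacency neighbor_depth (4 * filtered_edges.length + 3)
    [(focus_node_id, 0)] (PySem.Set.ofList [focus_node_id])

-- ===== PRECONDITION & SPEC =====
-- Pre_ excludes exactly the inputs where Python A raises KeyError: an edge dict missing
-- the 'source' or 'target' key.
def Pre_build_neighborhood_py (focus_node_id : String) (neighbor_depth : Int) (filtered_edges : List (List (String × String))) : Prop :=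
  ∀ e ∈ filtered_edges, "source" ∈ e.map Prod.fst ∧ "target" ∈ e.map Prod.fst
instance (focus_node_id : String) (neighbor_depth : Int) (filtered_edges : List (List (String × String))) : Decidable (Pre_build_neighborhood_py focus_node_id neighbor_depth filtered_edges) := by unfold Pre_build_neighborhood_py; infer_instance

def pvWitness_build_neighborhood_py : String × Int × (List (List (String × String))) :=
  ("a", 1, [[("source", "a"), ("target", "b")]])

def Spec_build_neighborhood_py (focus_node_id : String) (neighbor_depth : Int) (filtered_edges : List (List (String × String))) (out : List String) : Prop := out = build_neighborhood_py_alt focus_node_id neighbor_depth filtered_edges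
instance (focus_node_id : String) (neighbor_depth : Int) (filtered_edges : List (List (String × String))) (out : List String) : Decidable (Spec_build_neighborhood_py focus_node_id neighbor_depth filtered_edges out) := by unfold Spec_build_neighborhood_py; infer_instance

-- ===== CLAIM (what is proved, stated in full; the proofs are below) =====
def Claim_equal_build_neighborhood_py : Prop := ∀ (focus_node_id : String) (neighbor_depth : Int) (filtered_edges : List (List (String × String))), Dom_build_neighborhood_py focus_node_id neighbor_depth filtered_edges → Pre_build_neighborhood_py focus_node_id neighbor_depth filtered_edges → Spec_build_neighborhood_py focus_node_id neighbor_depth filtered_edges (build_neighborhood_py focus_node_id neighbor_depth filtered_edges)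

-- ===== LEMMAS AND PROOFS =====

-- nw v nbrs: the neighbors of one node newly discovered against visited set v, in order.
def nw : List String → List String → List String
  | _, [] => []
  | v, nb :: rest =>
      if PySem.Set.contains v nb then nw v rest else nb :: nw (PySem.Set.add v nb) rest

theorem foldl_nw {α : Type} (g : α → String → α) :
    ∀ (nbrs : List String) (v : List String) (a : α),
    nbrs.foldl (fun p nb => if PySem.Set.contains p.1 nb then p
        else (PySem.Set.add p.1 nb, g p.2 nb)) (v, a)
      = (v ++ nw v nbrs, (nw v nbrs).foldl g a) := by
  intro nbrs
  induction nbrs with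
  | nil => intro v a; simp [nw]
  | cons nb rest ih =>
      intro v a
      by_cases h : PySem.Set.contains v nb
      · simp only [List.foldl_cons, nw, if_pos h]
        exact ih v a
      · simp only [List.foldl_cons, nw, if_neg h]
        rw [ih]
        have hnb : ¬ nb ∈ v := fun hm => h ((PySem.Set.contains_iff _ _).mpr hm)
        have hadd : PySem.Set.add v nb = v ++ [nb] := by
          simp [PySem.Set.add, hnb]
        rw [hadd]
        simp

theorem mem_nw_not_mem : ∀ (nbrs v : List String) (x : String), x ∈ nw v nbrs → ¬ x ∈ v := by
  intro nbrs
  induction nbrs with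
  | nil => intro v x hx; simp [nw] at hx
  | cons nb rest ih =>
      intro v x hx
      by_cases h : PySem.Set.contains v nb
      · rw [nw, if_pos h] at hx; exact ih v x hx
      · rw [nw, if_neg h] at hx
        rcases List.mem_cons.mp hx with hx | hx
        · subst hx
          intro hv
          exact h ((PySem.Set.contains_iff _ _).mpr hv)
        · intro hv
          have := ih (PySem.Set.add v nb) x hx
          exact this ((PySem.Set.mem_add _ _ _).mpr (Or.inl hv))

theorem mem_nw_mem : ∀ (nbrs v : List String) (x : String), x ∈ nw v nbrs → x ∈ nbrs := by
  intro nbrs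
  induction nbrs with
  | nil => intro v x hx; simp [nw] at hx
  | cons nb rest ih =>
      intro v x hx
      by_cases h : PySem.Set.contains v nb
      · rw [nw, if_pos h] at hx; exact List.mem_cons_of_mem _ (ih v x hx)
      · rw [nw, if_neg h] at hx
        rcases List.mem_cons.mp hx with hx | hx
        · simp [hx]
        · exact List.mem_cons_of_mem _ (ih _ x hx)

theorem nodup_nw : ∀ (nbrs v : List String), (nw v nbrs).Nodup := by
  intro nbrs
  induction nbrs with
  | nil => intro v; simp [nw]
  | cons nb rest ih =>
      intro v
      by_cases h : PySem.Set.contains v nb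
      · rw [nw, if_pos h]; exact ih v
      · rw [nw, if_neg h]
        refine List.nodup_cons.mpr ⟨?_, ih _⟩
        intro hmem
        exact mem_nw_not_mem rest (PySem.Set.add v nb) nb hmem
          ((PySem.Set.mem_add _ _ _).mpr (Or.inr rfl))

theorem foldl_add_eq_append : ∀ (l s : List String), l.Nodup → (∀ x ∈ l, ¬ x ∈ s) →
    l.foldl PySem.Set.add s = s ++ l := by
  intro l
  induction l with
  | nil => intro s _ _; simp
  | cons x rest ih =>
      intro s hnd hdisj
      have hx : ¬ x ∈ s := hdisj x (by simp)
      have hadd : PySem.Set.add s x = s ++ [x] := by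
        simp [PySem.Set.add, PySem.Set.contains_eq_listContains]
        intro hc
        exact absurd hc hx
      simp only [List.foldl_cons, hadd]
      rw [ih (s ++ [x]) (List.nodup_cons.mp hnd).2]
      · simp
      · intro y hy hmem
        rcases List.mem_append.mp hmem with h1 | h1
        · exact hdisj y (List.mem_cons_of_mem _ hy) h1
        · have : y = x := by simpa using h1
          exact (List.nodup_cons.mp hnd).1 (this ▸ hy)

-- lnw adj v fr: all nodes newly discovered over a whole frontier, in order.
def lnw (adj : PySem.Dict String (PySem.Set String)) : List String → List String → List String
  | _, [] => []
  | v, n :: rest =>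
      nw v (adj.getD n []) ++ lnw adj (v ++ nw v (adj.getD n [])) rest

theorem mem_lnw_not_mem (adj : PySem.Dict String (PySem.Set String)) :
    ∀ (fr v : List String) (x : String), x ∈ lnw adj v fr → ¬ x ∈ v := by
  intro fr
  induction fr with
  | nil => intro v x hx; simp [lnw] at hx
  | cons n rest ih =>
      intro v x hx
      rw [lnw] at hx
      rcases List.mem_append.mp hx with h1 | h1
      · exact mem_nw_not_mem _ v x h1
      · intro hv
        exact ih _ x h1 (List.mem_append.mpr (Or.inl hv))

theorem mem_lnw_adj (adj : PySem.Dict String (PySem.Set String)) :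
    ∀ (fr v : List String) (x : String), x ∈ lnw adj v fr → ∃ n, x ∈ adj.getD n [] := by
  intro fr
  induction fr with
  | nil => intro v x hx; simp [lnw] at hx
  | cons n rest ih =>
      intro v x hx
      rcases List.mem_append.mp hx with h1 | h1
      · exact ⟨n, mem_nw_mem _ v x h1⟩
      · exact ih _ x h1

theorem nodup_lnw (adj : PySem.Dict String (PySem.Set String)) :
    ∀ (fr v : List String), (lnw adj v fr).Nodup := by
  intro fr
  induction fr with
  | nil => intro v; simp [lnw]
  | cons n rest ih =>
      intro v
      rw [lnw]
      refine List.Nodup.append (nodup_nw _ v) (ih _) ?_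
      intro x hx hx'
      exact mem_lnw_not_mem adj rest _ x hx' (List.mem_append.mpr (Or.inr hx))

-- One level of A's frontier expansion, characterized by lnw.
theorem levelA_char (adj : PySem.Dict String (PySem.Set String)) :
    ∀ (fr v nf : List String), (∀ x ∈ nf, x ∈ v) →
    fr.foldl (fun st2 node_id =>
        (adj.getD node_id []).foldl (fun st3 neighbor_id =>
          if PySem.Set.contains st3.1 neighbor_id then st3
          else (PySem.Set.add st3.1 neighbor_id, PySem.Set.add st3.2 neighbor_id)) st2) (v, nf)
      = (v ++ lnw adj v fr, nf ++ lnw adj v fr) := by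
  intro fr
  induction fr with
  | nil => intro v nf _; simp [lnw]
  | cons n rest ih =>
      intro v nf hsub
      simp only [List.foldl_cons]
      rw [foldl_nw PySem.Set.add (adj.getD n []) v nf]
      set w := nw v (adj.getD n []) with hw
      have hfold : w.foldl PySem.Set.add nf = nf ++ w := by
        refine foldl_add_eq_append w nf (nodup_nw _ v) ?_
        intro x hx hmem
        exact mem_nw_not_mem _ v x hx (hsub x hmem)
      rw [hfold, ih (v ++ w) (nf ++ w) ?_]
      · rw [lnw]
        simp [hw, List.append_assoc]
      · intro x hx
        rcases List.mem_append.mp hx with h1 | h1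
        · exact List.mem_append.mpr (Or.inl (hsub x h1))
        · exact List.mem_append.mpr (Or.inr h1)

-- The result of A's outer loop, as iterated levels.
def levelsA (adj : PySem.Dict String (PySem.Set String)) : Nat → List String → List String → List String
  | 0, v, _ => v
  | m + 1, v, fr => levelsA adj m (v ++ lnw adj v fr) (lnw adj v fr)

theorem portA_char (adj : PySem.Dict String (PySem.Set String)) :
    ∀ (l : List Int) (v fr : List String),
    (l.foldl (fun (st : PySem.Set String × PySem.Set String) (_ : Int) =>
        st.2.foldl (fun st2 node_id =>
          (adj.getD node_id []).foldl (fun st3 neighbor_id =>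
            if PySem.Set.contains st3.1 neighbor_id then st3
            else (PySem.Set.add st3.1 neighbor_id, PySem.Set.add st3.2 neighbor_id)) st2)
          (st.1, PySem.Set.empty)) (v, fr)).1
      = levelsA adj l.length v fr := by
  intro l
  induction l with
  | nil => intro v fr; simp [levelsA]
  | cons a rest ih =>
      intro v fr
      simp only [List.foldl_cons]
      have hstep := levelA_char adj fr v PySem.Set.empty (by intro x hx; simp [PySem.Set.empty] at hx)
      rw [hstep]
      rw [show PySem.Set.empty ++ lnw adj v fr = lnw adj v fr from rfl]
      rw [ih]
      simp [levelsA]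

-- sdf S v: the still-unvisited part of the universe S; drives the fuel accounting.
def sdf (S v : List String) : List String := S.filter (fun x => !decide (x ∈ v))

theorem filter_ne_length : ∀ (l : List String), l.Nodup → ∀ x ∈ l,
    (l.filter (fun z => !decide (z = x))).length + 1 = l.length := by
  intro l
  induction l with
  | nil => intro _ x hx; simp at hx
  | cons a rest ih =>
      intro hnd x hx
      have hrest_nd := (List.nodup_cons.mp hnd).2
      rcases List.mem_cons.mp hx with h | h
      · subst h
        have hrest : ¬ x ∈ rest := (List.nodup_cons.mp hnd).1
        have heq : rest.filter (fun z => !decide (z = x)) = rest := by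
          refine List.filter_eq_self.mpr ?_
          intro z hz
          have : z ≠ x := fun hzx => hrest (hzx ▸ hz)
          simp [this]
        simp [heq]
      · have hax : a ≠ x := fun hax => (List.nodup_cons.mp hnd).1 (hax ▸ h)
        have := ih hrest_nd x h
        simp [hax]
        omega

theorem sdf_snoc (x : String) (v : List String) (hxv : ¬ x ∈ v) :
    ∀ (S : List String), S.Nodup → x ∈ S →
    (sdf S (v ++ [x])).length + 1 = (sdf S v).length := by
  intro S hS hxS
  have h1 : sdf S (v ++ [x]) = (sdf S v).filter (fun z => !decide (z = x)) := by
    unfold sdf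
    rw [List.filter_filter]
    refine List.filter_congr ?_
    intro z _
    by_cases hzv : z ∈ v <;> by_cases hzx : z = x <;> simp [hzv, hzx]
  have hnd : (sdf S v).Nodup := List.Nodup.filter _ hS
  have hmem : x ∈ sdf S v := List.mem_filter.mpr ⟨hxS, by simp [hxv]⟩
  rw [h1, filter_ne_length (sdf S v) hnd x hmem]

theorem sdf_drop (S : List String) (hS : S.Nodup) :
    ∀ (w v : List String), w.Nodup → (∀ x ∈ w, x ∈ S) → (∀ x ∈ w, ¬ x ∈ v) →
    (sdf S (v ++ w)).length + w.length = (sdf S v).length := by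
  intro w
  induction w with
  | nil => intro v _ _ _; simp
  | cons x rest ih =>
      intro v hnd hsubS hdisj
      have hx : ¬ x ∈ v := hdisj x (by simp)
      have h1 := sdf_snoc x v hx S hS (hsubS x (by simp))
      have h2 := ih (v ++ [x]) (List.nodup_cons.mp hnd).2
        (fun y hy => hsubS y (List.mem_cons_of_mem _ hy))
        (fun y hy hmem => by
          rcases List.mem_append.mp hmem with hm | hm
          · exact hdisj y (List.mem_cons_of_mem _ hy) hm
          · have : y = x := by simpa using hm
            exact (List.nodup_cons.mp hnd).1 (this ▸ hy))
      have : v ++ x :: rest = (v ++ [x]) ++ rest := by simp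
      rw [this]
      simp only [List.length_cons]
      omega

-- B's inner neighbor fold, characterized by nw (instance of foldl_nw).
theorem foldB_inner (adj : PySem.Dict String (PySem.Set String)) (n : String) (d : Int)
    (v : List String) (q : List (String × Int)) :
    (adj.getD n []).foldl (fun st neighbor_id =>
        if PySem.Set.contains st.1 neighbor_id then st
        else (PySem.Set.add st.1 neighbor_id, st.2 ++ [(neighbor_id, d + 1)])) (v, q)
      = (v ++ nw v (adj.getD n []),
          q ++ (nw v (adj.getD n [])).map (fun nb => (nb, d + 1))) := by
  have h := foldl_nw (fun (q : List (String × Int)) nb => q ++ [(nb, d + 1)]) (adj.getD n []) v q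
  rw [h, PySem.List.foldl_append_singleton_eq_map]

-- Popping nodes whose depth is not below the cutoff only drains the queue.
theorem pvBFS_drain (adj : PySem.Dict String (PySem.Set String)) (k : Int) :
    ∀ (q : List (String × Int)) (fuel : Nat) (v : List String),
    q.length ≤ fuel → (∀ p ∈ q, ¬ p.2 < k) → pvBFS adj k fuel q v = v := by
  intro q
  induction q with
  | nil => intro fuel v _ _; cases fuel <;> rfl
  | cons p rest ih =>
      intro fuel v hlen hall
      obtain ⟨n, d⟩ := p
      cases fuel with
      | zero => simp at hlen
      | succ f =>
          rw [pvBFS, if_neg (hall (n, d) (by simp))]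
          exact ih f v (by simpa using hlen) (fun p hp => hall p (List.mem_cons_of_mem _ hp))

-- One whole level processed by the queue BFS.
theorem pvBFS_level (adj : PySem.Dict String (PySem.Set String)) (k : Int)
    (S : List String) (hS : S.Nodup)
    (hadj : ∀ n x, x ∈ adj.getD n [] → x ∈ S) (d : Int) (hd : d < k) :
    ∀ (fr nf v : List String) (fuel : Nat),
    (∀ x ∈ nf, x ∈ v) →
    fr.length + 2 * (sdf S v).length ≤ fuel →
    pvBFS adj k fuel (fr.map (fun n => (n, d)) ++ nf.map (fun n => (n, d + 1))) v
      = pvBFS adj k (fuel - fr.length)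
          ((nf ++ lnw adj v fr).map (fun n => (n, d + 1))) (v ++ lnw adj v fr) := by
  intro fr
  induction fr with
  | nil => intro nf v fuel _ _; simp [lnw]
  | cons n rest ih =>
      intro nf v fuel hsub hfuel
      have hfuel1 : 1 ≤ fuel := by simp [List.length_cons] at hfuel; omega
      obtain ⟨f, rfl⟩ : ∃ f, fuel = f + 1 := ⟨fuel - 1, by omega⟩
      simp only [List.map_cons, List.cons_append]
      rw [pvBFS, if_pos hd]
      simp only []
      rw [foldB_inner adj n d v (rest.map (fun n => (n, d)) ++ nf.map (fun n => (n, d + 1)))]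
      set w := nw v (adj.getD n []) with hw
      have hwS : ∀ x ∈ w, x ∈ S := fun x hx => hadj n x (mem_nw_mem _ v x hx)
      have hwv : ∀ x ∈ w, ¬ x ∈ v := fun x hx => mem_nw_not_mem _ v x hx
      have hdrop := sdf_drop S hS w v (nodup_nw _ v) hwS hwv
      have hq : rest.map (fun n => (n, d)) ++ nf.map (fun n => (n, d + 1))
            ++ w.map (fun nb => (nb, d + 1))
          = rest.map (fun n => (n, d)) ++ (nf ++ w).map (fun n => (n, d + 1)) := by
        simp [List.map_append]
      rw [hq]
      rw [ih (nf ++ w) (v ++ w) f ?_ ?_]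
      · have h1 : (f + 1) - (rest.length + 1) = f - rest.length := by omega
        rw [lnw]
        simp only [List.length_cons, h1, List.append_assoc]
        rw [hw]
      · intro x hx
        rcases List.mem_append.mp hx with h1 | h1
        · exact List.mem_append.mpr (Or.inl (hsub x h1))
        · exact List.mem_append.mpr (Or.inr h1)
      · simp only [List.length_cons] at hfuel
        omega

-- The queue BFS, started on one frontier at depth d, computes A's iterated levels.
theorem pvBFS_levels (adj : PySem.Dict String (PySem.Set String)) (k : Int)
    (S : List String) (hS : S.Nodup)
    (hadj : ∀ n x, x ∈ adj.getD n [] → x ∈ S) :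
    ∀ (m : Nat) (fr v : List String) (d : Int) (fuel : Nat),
    d + (m : Int) = k →
    fr.length + 2 * (sdf S v).length ≤ fuel →
    pvBFS adj k fuel (fr.map (fun n => (n, d))) v = levelsA adj m v fr := by
  intro m
  induction m with
  | zero =>
      intro fr v d fuel hk hfuel
      have hdk : d = k := by push_cast at hk; omega
      rw [levelsA]
      refine pvBFS_drain adj k _ fuel v (by simp; omega) ?_
      intro p hp
      rcases List.mem_map.mp hp with ⟨n, _, rfl⟩
      simp [hdk]
  | succ m ih =>
      intro fr v d fuel hk hfuel
      have hd : d < k := by push_cast at hk; omega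
      have h0 : fr.map (fun n => (n, d))
          = fr.map (fun n => (n, d)) ++ ([] : List String).map (fun n => (n, d + 1)) := by simp
      rw [h0, pvBFS_level adj k S hS hadj d hd fr [] v fuel (by simp) hfuel]
      simp only [List.nil_append]
      have hnd := nodup_lnw adj fr v
      have hsubS : ∀ x ∈ lnw adj v fr, x ∈ S := by
        intro x hx
        obtain ⟨n, hn⟩ := mem_lnw_adj adj fr v x hx
        exact hadj n x hn
      have hdisj : ∀ x ∈ lnw adj v fr, ¬ x ∈ v := fun x hx => mem_lnw_not_mem adj fr v x hx
      have hdrop := sdf_drop S hS (lnw adj v fr) v hnd hsubS hdisj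
      rw [levelsA]
      refine ih (lnw adj v fr) (v ++ lnw adj v fr) (d + 1) (fuel - fr.length) ?_ ?_
      · push_cast at hk ⊢; omega
      · omega

-- The universe of node names appearing in the adjacency structure.
def pvNodeList (focus_node_id : String) (filtered_edges : List (List (String × String))) : List String :=
  focus_node_id :: filtered_edges.flatMap (fun e => [pvEdgeGet e "source", pvEdgeGet e "target"])

theorem adj_mem (P : String → Prop) :
    ∀ (l : List (List (String × String))) (d : PySem.Dict String (PySem.Set String)),
    (∀ n x, x ∈ d.getD n [] → P x) →
    (∀ e ∈ l, P (pvEdgeGet e "source") ∧ P (pvEdgeGet e "target")) →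
    ∀ n x, x ∈ (l.foldl (fun d e =>
      (d.modify (pvEdgeGet e "source") [] (fun s => PySem.Set.add s (pvEdgeGet e "target"))).modify
        (pvEdgeGet e "target") [] (fun s => PySem.Set.add s (pvEdgeGet e "source"))) d).getD n [] → P x := by
  intro l
  induction l with
  | nil => intro d hd _ n x hx; exact hd n x hx
  | cons e rest ih =>
      intro d hd hP n x hx
      simp only [List.foldl_cons] at hx
      refine ih _ ?_ (fun e' he' => hP e' (List.mem_cons_of_mem _ he')) n x hx
      intro n' x' hx'
      rw [PySem.Dict.getD_modify] at hx'
      split at hx' <;> rename_i h1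
      · rw [PySem.Dict.getD_modify] at hx'
        rcases (PySem.Set.mem_add _ _ _).mp hx' with h2 | h2
        · split at h2 <;> rename_i h3
          · rcases (PySem.Set.mem_add _ _ _).mp h2 with h4 | h4
            · exact hd _ x' h4
            · exact h4 ▸ (hP e (by simp)).2
          · exact hd _ x' h2
        · exact h2 ▸ (hP e (by simp)).1
      · rw [PySem.Dict.getD_modify] at hx'
        split at hx' <;> rename_i h3
        · rcases (PySem.Set.mem_add _ _ _).mp hx' with h4 | h4
          · exact hd _ x' h4
          · exact h4 ▸ (hP e (by simp)).2
        · exact hd _ x' hx'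

theorem adj_sub_nodeList (focus_node_id : String) (filtered_edges : List (List (String × String))) :
    ∀ n x, x ∈ (pvBuildAdj filtered_edges).getD n [] → x ∈ pvNodeList focus_node_id filtered_edges := by
  unfold pvBuildAdj
  refine adj_mem _ filtered_edges PySem.Dict.empty ?_ ?_
  · intro n x hx; simp [PySem.Dict.getD_empty] at hx
  · intro e he
    constructor <;>
      · unfold pvNodeList
        refine List.mem_cons_of_mem _ (List.mem_flatMap.mpr ⟨e, he, by simp⟩)

theorem length_nodeList (focus_node_id : String) (filtered_edges : List (List (String × String))) :
    (pvNodeList focus_node_id filtered_edges).length = 1 + 2 * filtered_edges.length := by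
  unfold pvNodeList
  simp only [List.length_cons, List.length_flatMap]
  induction filtered_edges with
  | nil => simp
  | cons e rest ih => simp at ih ⊢; omega

-- Set literal {focus} as a list.
theorem ofList_singleton (x : String) : PySem.Set.ofList [x] = [x] := rfl

-- ===== VERDICT (by name: the statement is the Claim_ definition above) =====
theorem build_neighborhood_py_spec : Claim_equal_build_neighborhood_py := by
  intro focus_node_id neighbor_depth filtered_edges _ _
  unfold Spec_build_neighborhood_py build_neighborhood_py build_neighborhood_py_alt
  simp only [ofList_singleton]
  set adj := pvBuildAdj filtered_edges with hadjdef
  set S : List String := PySem.Set.ofList (pvNodeList focus_node_id filtered_edges) with hSdef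
  have hS : S.Nodup := PySem.Set.nodup_ofList _
  have hadj : ∀ n x, x ∈ adj.getD n [] → x ∈ S := by
    intro n x hx
    exact (PySem.Set.mem_ofList _ _).mpr (adj_sub_nodeList focus_node_id filtered_edges n x hx)
  have hSlen : S.length ≤ 1 + 2 * filtered_edges.length := by
    calc S.length ≤ (pvNodeList focus_node_id filtered_edges).length :=
          PySem.Set.length_ofList_le _
      _ = 1 + 2 * filtered_edges.length := length_nodeList _ _
  have hsd : (sdf S [focus_node_id]).length ≤ 1 + 2 * filtered_edges.length := by
    calc (sdf S [focus_node_id]).length ≤ S.length := List.length_filter_le _ _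
      _ ≤ 1 + 2 * filtered_edges.length := hSlen
  rw [portA_char adj (PySem.List.pyRange 0 neighbor_depth 1) [focus_node_id] [focus_node_id]]
  have hq : [(focus_node_id, (0 : Int))] = [focus_node_id].map (fun n => (n, (0 : Int))) := rfl
  rw [hq]
  by_cases hk : 0 ≤ neighbor_depth
  · rw [(pvBFS_levels adj neighbor_depth S hS hadj
        (PySem.List.pyRange 0 neighbor_depth 1).length [focus_node_id] [focus_node_id] 0
        (4 * filtered_edges.length + 3) ?_ ?_)]
    · rw [PySem.List.length_pyRange_one]
      simp only [Int.sub_zero]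
      rw [Int.toNat_of_nonneg hk]
      omega
    · simp only [List.length_cons, List.length_nil]
      omega
  · have hnil : PySem.List.pyRange 0 neighbor_depth 1 = [] :=
      PySem.List.pyRange_one_eq_nil (by omega)
    rw [hnil]
    simp only [List.length_nil, levelsA]
    refine (pvBFS_drain adj neighbor_depth _ _ _ (by simp) ?_).symm
    intro p hp
    simp only [List.map_cons, List.map_nil, List.mem_singleton] at hp
    subst hp
    simp
    omega
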